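-- pv_equiv track=rewrite | github.com/rafael5/vista-meta | host/scripts/build_routine_calls.py | strip_strings_and_comments
-- ===== SOURCE A (Python) =====
-- def strip_strings_and_comments(line: str) -> str:
--     """Remove `"..."` strings (with `""` escape) and trailing `;comment`."""
--     out: list[str] = []
--     i = 0
--     n = len(line)
--     in_string = False
--     while i < n:
--         c = line[i]
--         if in_string:
--             if c == '"':
--                 if i + 1 < n and line[i + 1] == '"':
--                     i += 2
--                     continue
--                 in_string = False
--             i += 1
--             continue
--         if c == '"':
--             in_string = True
--             i += 1
--             continue
--         if c == ';':
--             break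
--         out.append(c)
--         i += 1
--     return "".join(out)
-- ===== SOURCE B (Python) =====
-- def strip_strings_and_comments(line: str) -> str:
--     """Remove `"..."` strings (with `""` escape) and trailing `;comment`."""
--     # Split once on '"': the even-indexed pieces are exactly the unquoted text
--     # (the "" escape shows up as an empty even piece and vanishes); cut at the
--     # first ';' found in an unquoted piece.
--     out: list[str] = []
--     for part in line.split('"')[::2]:
--         if ';' in part:
--             out.append(part.partition(';')[0])
--             break
--         out.append(part)
--     return "".join(out)
-- ===== Notes on version B (the rewrite author's own statement) =====
-- stated objective: faster
-- what changed: Replaces the explicit character-by-character in_string automaton with a single split on the quote character (even-indexed pieces are exactly the unquoted text, the escaped quote pair degenerating to an empty even piece) followed by truncation at the first semicolon found in an unquoted piece.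
import Mathlib
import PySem

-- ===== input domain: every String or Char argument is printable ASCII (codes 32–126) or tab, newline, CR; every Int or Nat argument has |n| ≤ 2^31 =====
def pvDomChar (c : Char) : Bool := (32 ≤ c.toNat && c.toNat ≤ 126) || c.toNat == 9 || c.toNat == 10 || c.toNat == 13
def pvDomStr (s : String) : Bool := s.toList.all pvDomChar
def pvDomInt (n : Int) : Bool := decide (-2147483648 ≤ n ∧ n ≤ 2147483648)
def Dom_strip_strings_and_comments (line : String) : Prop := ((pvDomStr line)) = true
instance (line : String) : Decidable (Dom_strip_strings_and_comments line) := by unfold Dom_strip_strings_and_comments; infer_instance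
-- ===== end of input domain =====

-- B replaces A's explicit in_string character automaton by one split on '"' (even-indexed
-- pieces are the unquoted text) followed by truncation at the first ';' there (measurably faster: one C-level split instead of a per-character Python loop).


-- ===== PORT A =====
-- A's while loop over indices, transliterated as structural recursion on the remaining
-- characters with the same in_string flag; the `line[i+1]` lookahead becomes a match on
-- the tail, `out.append`/`"".join` become cons/String.ofList.
def stripGoA : List Char → Bool → List Char
  | [], _ => []
  | c :: rest, true =>
      if c = '"' then
        match rest with
        | '"' :: rest2 => stripGoA rest2 true          -- escaped "" : i += 2, stay in string
        | r => stripGoA r false                        -- closing quote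
      else stripGoA rest true                          -- char inside string, dropped
  | c :: rest, false =>
      if c = '"' then stripGoA rest true               -- opening quote
      else if c = ';' then []                          -- comment: break
      else c :: stripGoA rest false                    -- out.append(c)
termination_by l _ => l.length
decreasing_by all_goals (simp; try omega)

def strip_strings_and_comments (line : String) : String :=
  String.ofList (stripGoA line.toList false)

-- ===== PORT B =====
-- Source B's loop `for part in parts[::2]: …` with its break, as recursion over the part list;
-- `line.split('"')` is PySem.Chars.splitOn, `[::2]` is PySem.List.slice? with step 2 (never
-- none since 2 ≠ 0), `';' in part` is PySem.Chars.isIn, and `part.partition(';')[0]` is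
-- takeWhile (· ≠ ';') (exact: partition's first component is everything before the first ';').
def stripGoB : List (List Char) → List Char
  | [] => []
  | p :: ps =>
      if PySem.Chars.isIn [';'] p then p.takeWhile (· ≠ ';')
      else p ++ stripGoB ps

def strip_strings_and_comments_alt (line : String) : String :=
  String.ofList (stripGoB ((PySem.List.slice? (PySem.Chars.splitOn line.toList ['"']) none none 2).getD []))

-- ===== PRECONDITION & SPEC =====
def Spec_strip_strings_and_comments (line : String) (out : String) : Prop := out = strip_strings_and_comments_alt line
instance (line : String) (out : String) : Decidable (Spec_strip_strings_and_comments line out) := by unfold Spec_strip_strings_and_comments; infer_instance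

-- ===== CLAIM (what is proved, stated in full; the proofs are below) =====
def Claim_equal_strip_strings_and_comments : Prop := ∀ (line : String), Dom_strip_strings_and_comments line → Spec_strip_strings_and_comments line (strip_strings_and_comments line)

-- ===== LEMMAS AND PROOFS =====

-- (current unquoted-part prefix, remaining parts): a structural model of split('"')
def fsp : List Char → List Char × List (List Char)
  | [] => ([], [])
  | c :: rest =>
      let r := fsp rest
      if c = '"' then ([], r.1 :: r.2) else (c :: r.1, r.2)

-- every other element, starting with the first (the even-indexed ones)
def evens {α : Type} : List α → List α
  | [] => []
  | [x] => [x]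
  | x :: _ :: r => x :: evens r

lemma evens_cons {α : Type} (x : α) (l : List α) :
    evens (x :: l) = x :: evens (l.drop 1) := by
  cases l <;> rfl

lemma go_eq_fsp (fuel : Nat) : ∀ (l cur : List Char) (acc : List (List Char)),
    l.length ≤ fuel →
    PySem.Chars.splitOn.go ['"'] fuel l cur acc
      = acc.reverse ++ (cur.reverse ++ (fsp l).1) :: (fsp l).2 := by
  induction fuel with
  | zero =>
      intro l cur acc h
      have hl : l = [] := by simpa using h
      subst hl
      simp [PySem.Chars.splitOn.go, fsp]
  | succ n ih =>
      intro l cur acc h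
      cases l with
      | nil => simp [PySem.Chars.splitOn.go, fsp]
      | cons c rest =>
          by_cases hc : c = '"'
          · subst hc
            rw [show PySem.Chars.splitOn.go ['"'] (n+1) ('"' :: rest) cur acc
                = PySem.Chars.splitOn.go ['"'] n rest [] (cur.reverse :: acc) by
                  simp [PySem.Chars.splitOn.go, List.isPrefixOf]]
            rw [ih rest [] (cur.reverse :: acc) (by simpa using h)]
            simp [fsp]
          · rw [show PySem.Chars.splitOn.go ['"'] (n+1) (c :: rest) cur acc
                = PySem.Chars.splitOn.go ['"'] n rest (c :: cur) acc by
                  simp [PySem.Chars.splitOn.go, List.isPrefixOf]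
                  exact fun h' => absurd h'.symm hc]
            rw [ih rest (c :: cur) acc (by simp at h; omega)]
            simp [fsp, hc]

lemma splitOn_eq_fsp (l : List Char) :
    PySem.Chars.splitOn l ['"'] = (fsp l).1 :: (fsp l).2 := by
  unfold PySem.Chars.splitOn
  rw [go_eq_fsp (l.length + 1) l [] [] (by omega)]
  simp

lemma filterMap_even {α : Type} (xs : List α) :
    List.filterMap (fun k => xs[2 * k]?) (List.range ((xs.length + 1) / 2)) = evens xs := by
  induction xs using evens.induct with
  | case1 => simp [evens]
  | case2 x => simp [evens, List.range_succ]
  | case3 x y r ih =>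
      have hlen : ((x :: y :: r).length + 1) / 2 = (r.length + 1) / 2 + 1 := by
        simp [List.length_cons]; omega
      rw [hlen, List.range_succ_eq_map, List.filterMap_cons, List.filterMap_map]
      simp only [List.getElem?_cons_zero, Nat.mul_zero]
      rw [show ((fun k => (x :: y :: r)[2 * k]?) ∘ Nat.succ) = (fun k => r[2 * k]?) by
        funext k
        simp [Nat.mul_succ]]
      rw [ih]
      rfl

lemma slice2_eq_evens {α : Type} (xs : List α) :
    PySem.List.slice? xs none none 2 = some (evens xs) := by
  simp only [PySem.List.slice?, PySem.List.sliceIndices]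
  norm_num
  rcases xs with _ | ⟨a, t⟩
  · simp [evens]
  · rw [if_pos (by simp)]
    have h2 : ((((a :: t).length : Int) + 2 - 1) / 2).toNat = ((a :: t).length + 1) / 2 := by
      omega
    have hf : (fun x : Nat => (a :: t)[(2 * (x : Int)).toNat]?) = (fun x => (a :: t)[2 * x]?) := by
      funext k
      rw [show ((2 * (k : Int)).toNat) = 2 * k by omega]
    rw [h2, hf]
    exact filterMap_even _

lemma isIn_semi_iff (p : List Char) : PySem.Chars.isIn [';'] p = true ↔ ';' ∈ p := by
  rw [PySem.Chars.isIn_iff_infix, List.singleton_infix_iff]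

lemma isIn_semi_nil : PySem.Chars.isIn [';'] [] = false := by
  rw [Bool.eq_false_iff, Ne, isIn_semi_iff]
  simp

lemma isIn_semi_cons (c : Char) (hc : c ≠ ';') (p : List Char) :
    PySem.Chars.isIn [';'] (c :: p) = PySem.Chars.isIn [';'] p := by
  rw [Bool.eq_iff_iff, isIn_semi_iff, isIn_semi_iff, List.mem_cons]
  simp [Ne.symm hc]

lemma stripGoB_nil_cons (ps : List (List Char)) :
    stripGoB ([] :: ps) = stripGoB ps := by
  simp [stripGoB, isIn_semi_nil]

lemma stripGoB_cons_ne (c : Char) (hc : c ≠ ';') (p : List Char) (ps : List (List Char)) :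
    stripGoB ((c :: p) :: ps) = c :: stripGoB (p :: ps) := by
  simp only [stripGoB, isIn_semi_cons c hc p]
  by_cases h : PySem.Chars.isIn [';'] p = true
  · simp [h, hc]
  · simp [Bool.eq_false_iff.mpr h]

lemma stripGoB_semi (p : List Char) (ps : List (List Char)) :
    stripGoB ((';' :: p) :: ps) = [] := by
  have h : PySem.Chars.isIn [';'] (';' :: p) = true := (isIn_semi_iff _).mpr (by simp)
  simp [stripGoB, h]

lemma fsp_quote (rest : List Char) :
    fsp ('"' :: rest) = ([], (fsp rest).1 :: (fsp rest).2) := by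
  simp [fsp]

lemma fsp_ne (c : Char) (hc : c ≠ '"') (rest : List Char) :
    fsp (c :: rest) = (c :: (fsp rest).1, (fsp rest).2) := by
  simp [fsp, hc]

lemma main_equiv : ∀ (n : Nat) (l : List Char), l.length ≤ n →
    stripGoA l false = stripGoB (evens ((fsp l).1 :: (fsp l).2))
      ∧ stripGoA l true = stripGoB (evens (fsp l).2) := by
  intro n
  induction n with
  | zero =>
      intro l h
      have hl : l = [] := by simpa using h
      subst hl
      constructor <;> simp [stripGoA, fsp, evens, stripGoB, isIn_semi_nil]
  | succ n ih =>
      intro l h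
      cases l with
      | nil => constructor <;> simp [stripGoA, fsp, evens, stripGoB, isIn_semi_nil]
      | cons c rest =>
          have hr : rest.length ≤ n := by simp at h; omega
          constructor
          · -- the loop outside a string
            by_cases hc : c = '"'
            · subst hc
              rw [show stripGoA ('"' :: rest) false = stripGoA rest true by simp [stripGoA],
                fsp_quote]
              rw [show evens (([] : List Char) :: (fsp rest).1 :: (fsp rest).2)
                  = [] :: evens (fsp rest).2 from rfl]
              rw [stripGoB_nil_cons]
              exact (ih rest hr).2
            · by_cases hsc : c = ';'
              · subst hsc
                rw [show stripGoA (';' :: rest) false = [] by simp [stripGoA],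
                  fsp_ne ';' hc rest]
                rw [show ((';' :: (fsp rest).1, (fsp rest).2) : List Char × List (List Char)).1
                    = ';' :: (fsp rest).1 from rfl]
                rw [evens_cons, stripGoB_semi]
              · rw [show stripGoA (c :: rest) false = c :: stripGoA rest false by
                  simp [stripGoA, hc, hsc], fsp_ne c hc rest]
                rw [show ((c :: (fsp rest).1, (fsp rest).2) : List Char × List (List Char)).1
                    = c :: (fsp rest).1 from rfl]
                rw [evens_cons, stripGoB_cons_ne c hsc, ← evens_cons]
                rw [(ih rest hr).1]
          · -- the loop inside a string
            by_cases hc : c = '"'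
            · subst hc
              cases rest with
              | nil =>
                  rw [show stripGoA ['"'] true = stripGoA [] false by simp [stripGoA],
                    fsp_quote]
                  exact (ih [] (by simp)).1
              | cons c2 rest2 =>
                  by_cases h2 : c2 = '"'
                  · subst h2
                    rw [show stripGoA ('"' :: '"' :: rest2) true = stripGoA rest2 true by
                      simp [stripGoA], fsp_quote, fsp_quote]
                    rw [show evens (([] : List Char) :: (fsp rest2).1 :: (fsp rest2).2)
                        = [] :: evens (fsp rest2).2 from rfl]
                    rw [stripGoB_nil_cons]
                    exact (ih rest2 (by simp at h; omega)).2
                  · rw [show stripGoA ('"' :: c2 :: rest2) true = stripGoA (c2 :: rest2) false by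
                      simp [stripGoA, h2], fsp_quote]
                    exact (ih (c2 :: rest2) hr).1
            · rw [show stripGoA (c :: rest) true = stripGoA rest true by
                rw [stripGoA.eq_def]; simp [hc], fsp_ne c hc rest]
              exact (ih rest hr).2

-- ===== VERDICT (by name: the statement is the Claim_ definition above) =====
theorem strip_strings_and_comments_spec : Claim_equal_strip_strings_and_comments := by
  intro line _
  unfold Spec_strip_strings_and_comments strip_strings_and_comments strip_strings_and_comments_alt
  rw [splitOn_eq_fsp, slice2_eq_evens, Option.getD_some,
    (main_equiv line.toList.length line.toList le_rfl).1]
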